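-- pv_equiv track=rewrite | github.com/sheldoer/Suda_examination_notes | 复试笔记/历年真题Python代码/1602模拟题_90min/1602模拟题.py | count_v
-- ===== SOURCE A (Python) =====
-- def count_v(vlst, vset):
--     # 构造车辆进出校园次数的字典
--     keys=vset          #将车辆列表设为关键词集合
--     lst=[]
--     for i in vlst:
--         lst.append(i[:10])
--     values=list(lst.count(i) for i in vset)   #根据每辆车出现的次数列表设为值表
--     fre=dict(zip(keys,values))                 #根据关键词列表与值列表构成字典
--     return fre
-- ===== SOURCE B (Python) =====
-- def count_v(vlst, vset):
--     # Sort the 10-char prefixes, then one run-length scan over the sorted list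
--     # records each distinct prefix's multiplicity; finally each key looks it up.
--     pref = sorted(i[:10] for i in vlst)
--     runs = {}
--     n = len(pref)
--     j = 0
--     while j < n:
--         k = j
--         while k < n and pref[k] == pref[j]:
--             k += 1
--         runs[pref[j]] = k - j
--         j = k
--     return {v: runs.get(v, 0) for v in vset}
-- ===== Notes on version B (the rewrite author's own statement) =====
-- stated objective: faster
-- what changed: A scans the full prefix list once per key with list.count (O(n*k)); B sorts the prefixes once, run-length-scans the sorted list to record each distinct prefix's multiplicity, then answers each key by a single lookup (O(n log n + k)).
import Mathlib
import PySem

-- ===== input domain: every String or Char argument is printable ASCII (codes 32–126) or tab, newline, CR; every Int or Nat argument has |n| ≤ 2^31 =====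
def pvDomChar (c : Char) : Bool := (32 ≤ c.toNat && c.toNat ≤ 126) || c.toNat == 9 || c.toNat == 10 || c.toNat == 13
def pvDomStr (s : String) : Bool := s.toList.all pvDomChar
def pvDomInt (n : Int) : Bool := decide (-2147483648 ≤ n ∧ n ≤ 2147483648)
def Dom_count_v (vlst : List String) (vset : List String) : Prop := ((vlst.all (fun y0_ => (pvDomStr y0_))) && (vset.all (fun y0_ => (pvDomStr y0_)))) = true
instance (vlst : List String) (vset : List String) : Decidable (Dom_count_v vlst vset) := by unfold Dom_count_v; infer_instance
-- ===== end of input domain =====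

-- B replaces A's per-key scan of the prefix list (list.count for every key) with
-- sort + one run-length scan + per-key lookup; objective: alternative algorithm.

-- ===== PORT A =====
def count_v (vlst : List String) (vset : List String) : List (String × Int) :=
  let keys := vset
  let lst := vlst.foldl (fun acc i => acc ++ [PySem.Str.slice i none (some 10)]) []
  let values := vset.map (fun i => (PySem.List.count lst i : Int))
  let fre := PySem.Dict.ofList (keys.zip values)
  fre.items

-- ===== PORT B =====
-- the two nested while loops of Source B: the inner loop advances over the run of
-- elements equal to pref[j] (takeWhile/dropWhile), the outer records its length.
def buildRuns : List String → PySem.Dict String Int → PySem.Dict String Int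
  | [], runs => runs
  | x :: xs, runs =>
      buildRuns ((x :: xs).dropWhile (fun y => y == x))
        (runs.insert x ((((x :: xs).takeWhile (fun y => y == x)).length : Int)))
  termination_by l _ => l.length
  decreasing_by
    simp only [List.dropWhile_cons, beq_self_eq_true, if_true]
    exact Nat.lt_succ_of_le (List.length_dropWhile_le _ _)

def count_v_alt (vlst : List String) (vset : List String) : List (String × Int) :=
  let pref := PySem.List.sorted (vlst.map (fun i => PySem.Str.slice i none (some 10))) (fun x => x) false
  let runs := buildRuns pref PySem.Dict.empty
  (vset.foldl (fun d v => d.insert v (runs.getD v 0)) PySem.Dict.empty).items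

-- ===== PRECONDITION & SPEC =====
def Spec_count_v (vlst : List String) (vset : List String) (out : List (String × Int)) : Prop := out = count_v_alt vlst vset
instance (vlst : List String) (vset : List String) (out : List (String × Int)) : Decidable (Spec_count_v vlst vset out) := by unfold Spec_count_v; infer_instance

-- ===== CLAIM (what is proved, stated in full; the proofs are below) =====
def Claim_equal_count_v : Prop := ∀ (vlst : List String) (vset : List String), Dom_count_v vlst vset → Spec_count_v vlst vset (count_v vlst vset)

-- ===== LEMMAS AND PROOFS =====

-- A's dict, fed pairs (k, f k), is the fold inserting f k at k.
lemma zip_map_foldl_insert (ks : List String) (f : String → Int) (d : PySem.Dict String Int) :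
    (ks.zip (ks.map f)).foldl (fun d p => d.insert p.1 p.2) d
      = ks.foldl (fun d k => d.insert k (f k)) d := by
  induction ks generalizing d with
  | nil => rfl
  | cons k ks ih => simpa using ih (d.insert k (f k))

-- run-length scan of a sorted list: lookup of v gives v's multiplicity.
lemma getD_buildRuns (s : List String) (runs : PySem.Dict String Int) (v : String)
    (hs : s.Pairwise (· ≤ ·)) :
    (buildRuns s runs).getD v 0
      = if v ∈ s then (s.count v : Int) else runs.getD v 0 := by
  revert hs
  induction s, runs using buildRuns.induct with
  | case1 runs =>
      intro _
      rw [buildRuns, if_neg (List.not_mem_nil)]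
  | case2 x xs runs ih =>
      intro hs
      set t := (x :: xs).takeWhile (fun y => y == x) with ht
      set r := (x :: xs).dropWhile (fun y => y == x) with hr
      have hsplit : x :: xs = t ++ r := (List.takeWhile_append_dropWhile).symm
      have ht_all : ∀ y ∈ t, y = x := by
        intro y hy
        rw [ht] at hy
        have hpy := List.mem_takeWhile_imp hy
        simpa using hpy
      have hx_le : ∀ y ∈ xs, x ≤ y := by
        intro y hy; exact (List.pairwise_cons.mp hs).1 y hy
      have hr_sub : r.Sublist (x :: xs) := List.dropWhile_sublist _
      have hr_pw : r.Pairwise (· ≤ ·) := hs.sublist hr_sub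
      have hr_gt : ∀ y ∈ r, x < y := by
        intro y hy
        cases hhr : r with
        | nil => simp [hhr] at hy
        | cons h rt =>
            have hhne : ¬((h == x) = true) := by
              have := List.head?_dropWhile_not (fun y => y == x) (x :: xs)
              rw [← hr, hhr] at this
              simpa using this
            have hhx : h ≠ x := by simpa using hhne
            have hhmem : h ∈ xs := by
              have : h ∈ x :: xs := hr_sub.mem (by simp [hhr])
              rcases List.mem_cons.mp this with h1 | h1
              · exact absurd h1 hhx
              · exact h1
            have hxh : x < h := lt_of_le_of_ne (hx_le h hhmem) (Ne.symm hhx)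
            rw [hhr] at hy
            rcases List.mem_cons.mp hy with h1 | h1
            · subst h1; exact hxh
            · have hhy : h ≤ y := by
                have := List.pairwise_cons.mp (by rwa [hhr] at hr_pw)
                exact this.1 y h1
              exact lt_of_lt_of_le hxh hhy
      have hIH := ih hr_pw
      rw [buildRuns]
      rw [hIH]
      have hcount_split : ∀ w : String, (x :: xs).count w = t.count w + r.count w := by
        intro w; rw [hsplit, List.count_append]
      by_cases hv : v = x
      · subst hv
        have hvr : v ∉ r := fun h => lt_irrefl v (hr_gt v h)
        have hct : t.count v = t.length := List.count_eq_length.mpr (fun b hb => (ht_all b hb).symm)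
        have hcr : r.count v = 0 := List.count_eq_zero.mpr hvr
        simp [hvr, hcount_split v, hct, hcr]
      · have hvt : v ∉ t := fun h => hv (ht_all v h)
        have hct : t.count v = 0 := List.count_eq_zero.mpr hvt
        have hmem_iff : v ∈ x :: xs ↔ v ∈ r := by
          rw [hsplit]; simp [List.mem_append, hvt]
        by_cases hvr : v ∈ r
        · simp [hvr, hmem_iff.mpr hvr, hcount_split v, hct]
        · have hns : v ∉ (x :: xs) := fun h => hvr (hmem_iff.mp h)
          simp [hvr, hns, PySem.Dict.getD_insert, hv]

-- ===== VERDICT (by name: the statement is the Claim_ definition above) =====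
theorem count_v_spec : Claim_equal_count_v := by
  intro vlst vset _
  unfold Spec_count_v count_v count_v_alt
  simp only [PySem.List.foldl_append_singleton_eq_map, List.nil_append]
  set pref : String → String := fun i => PySem.Str.slice i none (some 10) with hpref
  set plist := vlst.map pref with hplist
  set s := PySem.List.sorted plist (fun x => x) false with hsorted
  have hperm : s.Perm plist := PySem.List.sorted_perm _ _ _
  have hpw : s.Pairwise (· ≤ ·) := by
    have := PySem.List.sorted_pairwise (xs := plist) (key := fun x => x)
    simpa using this
  set cnt : String → Int := fun i => ((PySem.List.count plist i : Int)) with hcnt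
  have hA : PySem.Dict.ofList (vset.zip (vset.map cnt))
      = vset.foldl (fun d k => d.insert k (cnt k)) PySem.Dict.empty :=
    zip_map_foldl_insert vset cnt PySem.Dict.empty
  show (PySem.Dict.ofList (vset.zip (vset.map cnt))).items = _
  rw [hA]
  have hfun : ∀ (d : PySem.Dict String Int) (k : String), k ∈ vset →
      d.insert k (cnt k)
        = d.insert k ((buildRuns s PySem.Dict.empty).getD k 0) := by
    intro d k _
    congr 1
    rw [getD_buildRuns s PySem.Dict.empty k hpw]
    by_cases hk : k ∈ s
    · simp [hcnt, hk, hperm.count_eq, PySem.List.count]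
    · have h0 : plist.count k = 0 := by
        rw [← hperm.count_eq]; exact List.count_eq_zero.mpr hk
      simp [hcnt, hk, PySem.List.count, h0]
  refine congrArg PySem.Dict.items ?_
  exact PySem.List.foldl_congr_mem
    (l := vset)
    (f := fun (d : PySem.Dict String Int) k => d.insert k (cnt k))
    (g := fun (d : PySem.Dict String Int) k => d.insert k ((buildRuns s PySem.Dict.empty).getD k 0))
    (init := PySem.Dict.empty)
    (by intro acc x hx; exact hfun acc x hx)
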